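-- pv_equiv track=rewrite | github.com/777bareman777/It-is-coding-test | chapter-3-greedy/1이-될-때까지-myself.py | solution
-- ===== SOURCE A (Python) =====
-- def solution(N,K):
--     count = 0
--     while(N>1):
--         if N % K == 0:
--             N//=K
--         else:
--             N-=1
--         count +=1
--     return count
-- ===== SOURCE B (Python) =====
-- def solution(N, K):
--     # Bulk-subtract to the next multiple of |K|, then divide: O(log N) steps.
--     count = 0
--     a = abs(K)
--     while N > 1:
--         r = N % a
--         if r == 0:
--             N //= K
--             count += 1
--         else:
--             step = min(r, N - 1)
--             N -= step
--             count += step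
--     return count
-- ===== Notes on version B (the rewrite author's own statement) =====
-- stated objective: faster
-- what changed: Instead of decrementing N by 1 per loop iteration, B subtracts the whole remainder N % |K| (capped at N-1) in one step before each division, turning O(N) iterations into O(log N).
import Mathlib
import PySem

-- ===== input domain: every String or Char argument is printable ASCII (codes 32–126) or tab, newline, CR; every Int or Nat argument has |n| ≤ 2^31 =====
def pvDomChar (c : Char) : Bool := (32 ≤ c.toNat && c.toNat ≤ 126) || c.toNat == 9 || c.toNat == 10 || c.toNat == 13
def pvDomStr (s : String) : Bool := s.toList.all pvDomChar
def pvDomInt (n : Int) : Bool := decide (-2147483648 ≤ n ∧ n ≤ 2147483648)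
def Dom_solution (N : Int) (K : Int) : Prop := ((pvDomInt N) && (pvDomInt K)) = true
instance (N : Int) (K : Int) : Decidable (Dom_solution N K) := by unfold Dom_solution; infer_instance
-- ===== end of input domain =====

-- B subtracts the whole remainder N % |K| in one step before each division instead of A's
-- one-by-one decrements (measured asymptotic speed-up); return values agree on Pre_.

-- ===== PORT A =====
-- A's while-loop; the dite guard only makes the recursion total (inside Pre_ the next N
-- is always strictly smaller, so the guard branch is never taken there).
def solutionLoop (K N count : Int) : Int :=
  if _h : N > 1 then
    let N' := if PySem.Int.mod N K == 0 then PySem.Int.floordiv N K else N - 1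
    if h2 : N'.toNat < N.toNat then solutionLoop K N' (count + 1) else count + 1
  else count
termination_by N.toNat
decreasing_by exact h2

def solution (N : Int) (K : Int) : Int := solutionLoop K N 0

-- ===== PORT B =====
-- B's while-loop (Source B); same kind of totality guards.
def solutionAltLoop (K N count : Int) : Int :=
  if _h : N > 1 then
    let r := PySem.Int.mod N |K|
    if r == 0 then
      let N' := PySem.Int.floordiv N K
      if h2 : N'.toNat < N.toNat then solutionAltLoop K N' (count + 1) else count
    else
      let step := min r (N - 1)
      if h2 : (N - step).toNat < N.toNat then solutionAltLoop K (N - step) (count + step) else count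
  else count
termination_by N.toNat
decreasing_by exacts [h2, h2]

def solution_alt (N : Int) (K : Int) : Int := solutionAltLoop K N 0

-- ===== PRECONDITION & SPEC =====
-- Pre_ excludes K = 0 (Python's N % 0 raises ZeroDivisionError) and K = 1 with N > 1
-- (A's loop never terminates there); on all other inputs A returns normally.
def Pre_solution (N : Int) (K : Int) : Prop := K ≠ 0 ∧ (K = 1 → N ≤ 1)
instance (N : Int) (K : Int) : Decidable (Pre_solution N K) := by unfold Pre_solution; infer_instance
def pvWitness_solution : Int × Int := (25, 3)

def Spec_solution (N : Int) (K : Int) (out : Int) : Prop := out = solution_alt N K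
instance (N : Int) (K : Int) (out : Int) : Decidable (Spec_solution N K out) := by unfold Spec_solution; infer_instance

-- ===== CLAIM (what is proved, stated in full; the proofs are below) =====
def Claim_equal_solution : Prop := ∀ (N : Int) (K : Int), Dom_solution N K → Pre_solution N K → Spec_solution N K (solution N K)

-- ===== LEMMAS AND PROOFS =====

-- A runs s consecutive subtract-1 steps as long as the remainder mod |K| stays positive.
lemma loopA_sub (K : Int) (hK : K ≠ 0) :
    ∀ (s : Nat) (N count : Int),
      (s : Int) ≤ PySem.Int.mod N |K| → (s : Int) ≤ N - 1 →
      solutionLoop K N count = solutionLoop K (N - s) (count + s) := by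
  intro s
  induction s with
  | zero => intro N count _ _; simp
  | succ s ih =>
    intro N count hr hn
    have ha : (0:Int) < |K| := abs_pos.mpr hK
    have hmod : PySem.Int.mod N |K| = N % |K| := PySem.Int.mod_eq_emod_of_pos ha
    have hN : N > 1 := by push_cast at hn; omega
    have hKdvd : ¬ (K ∣ N) := by
      intro hd
      have habs : |K| ∣ N := (abs_dvd K N).mpr hd
      have : N % |K| = 0 := Int.emod_eq_zero_of_dvd habs
      push_cast at hr; omega
    have hmodK : ¬ (PySem.Int.mod N K == 0) = true := by
      simp only [beq_iff_eq]
      rw [PySem.Int.mod_eq_zero_iff_dvd]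
      exact hKdvd
    rw [solutionLoop]
    rw [dif_pos hN]
    simp only [hmodK, Bool.false_eq_true, if_false]
    have hguard : (N - 1).toNat < N.toNat := by omega
    rw [dif_pos hguard]
    have hr' : (s : Int) ≤ PySem.Int.mod (N - 1) |K| := by
      have h1 : (N - 1) % |K| = N % |K| - 1 := by
        have h0 : 0 ≤ N % |K| := Int.emod_nonneg N (by omega)
        have h2 : N % |K| < |K| := Int.emod_lt_of_pos N ha
        have hpos : 1 ≤ N % |K| := by push_cast at hr; omega
        have ha2 : 2 ≤ |K| := by omega
        have h1m : (1:Int) % |K| = 1 := Int.emod_eq_of_lt (by omega) (by omega)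
        have h1' : (N % |K| - 1) % |K| = N % |K| - 1 := Int.emod_eq_of_lt (by omega) (by omega)
        rw [Int.sub_emod, h1m, h1']
      rw [PySem.Int.mod_eq_emod_of_pos ha, h1, ← hmod]
      push_cast at hr ⊢; omega
    have hn' : (s : Int) ≤ (N - 1) - 1 := by push_cast at hn ⊢; omega
    rw [ih (N - 1) (count + 1) hr' hn']
    congr 1 <;> push_cast <;> ring

-- Main loop equivalence on Pre_ (for K ≠ 0, K ≠ 1).
lemma loop_eq (K : Int) (hK0 : K ≠ 0) (hK1 : K ≠ 1) :
    ∀ (n : Nat) (N count : Int), N.toNat ≤ n →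
      solutionLoop K N count = solutionAltLoop K N count := by
  intro n
  induction n with
  | zero =>
    intro N count hle
    have hN : ¬ N > 1 := by omega
    rw [solutionLoop, solutionAltLoop, dif_neg hN, dif_neg hN]
  | succ n ih =>
    intro N count hle
    by_cases hN : N > 1
    · have ha : (0:Int) < |K| := abs_pos.mpr hK0
      by_cases hdvd : K ∣ N
      · -- divisible: both divide by K
        have hmodK : (PySem.Int.mod N K == 0) = true := by
          simp only [beq_iff_eq]; rw [PySem.Int.mod_eq_zero_iff_dvd]; exact hdvd
        have hmoda : (PySem.Int.mod N |K| == 0) = true := by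
          simp only [beq_iff_eq]; rw [PySem.Int.mod_eq_zero_iff_dvd]
          exact (abs_dvd K N).mpr hdvd
        have hguard : (PySem.Int.floordiv N K).toNat < N.toNat := by
          rcases lt_trichotomy K 0 with hneg | hz | hpos
          · -- K < 0: the quotient is negative (quotient * K = N > 0)
            have hid := PySem.Int.floordiv_mul_add_mod N K
            have hm0 : PySem.Int.mod N K = 0 := by
              rw [PySem.Int.mod_eq_zero_iff_dvd]; exact hdvd
            have hmul : PySem.Int.floordiv N K * K = N := by omega
            have hq : PySem.Int.floordiv N K < 0 := by
              rcases lt_or_ge (PySem.Int.floordiv N K) 0 with h | h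
              · exact h
              · have : PySem.Int.floordiv N K * K ≤ 0 :=
                  mul_nonpos_of_nonneg_of_nonpos h (by omega)
                omega
            omega
          · exact absurd hz hK0
          · -- 0 < K, K ≠ 1 hence K ≥ 2
            have hfd : PySem.Int.floordiv N K = N / K := PySem.Int.floordiv_eq_ediv_of_pos hpos
            have h1 : 0 ≤ N / K := Int.ediv_nonneg (by omega) (by omega)
            have hK2 : 2 ≤ K := by omega
            have h2 : N / K < N := by
              rw [Int.ediv_lt_iff_lt_mul (by omega)]
              nlinarith [hN, hK2]
            omega
        rw [solutionLoop, solutionAltLoop, dif_pos hN, dif_pos hN]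
        simp only [hmodK, hmoda, if_true]
        rw [dif_pos hguard, dif_pos hguard]
        exact ih _ _ (by omega)
      · -- not divisible: B bulk-subtracts step = min r (N-1); A does it one by one
        have hmod : PySem.Int.mod N |K| = N % |K| := PySem.Int.mod_eq_emod_of_pos ha
        have hrpos : 1 ≤ PySem.Int.mod N |K| := by
          have h0 : 0 ≤ N % |K| := Int.emod_nonneg N (by omega)
          have hne : PySem.Int.mod N |K| ≠ 0 := fun h =>
            hdvd ((abs_dvd K N).mp ((PySem.Int.mod_eq_zero_iff_dvd N |K|).mp h))
          omega
        have hmoda : ¬ (PySem.Int.mod N |K| == 0) = true := by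
          simp only [beq_iff_eq]; omega
        set r := PySem.Int.mod N |K| with hrdef
        set step := min r (N - 1) with hstep
        have hstep1 : 1 ≤ step := by omega
        have hstepN : step ≤ N - 1 := by omega
        have hguard : (N - step).toNat < N.toNat := by omega
        rw [solutionAltLoop, dif_pos hN]
        rw [if_neg (by simpa using hmoda), ← hstep, dif_pos hguard]
        have hcast : ((step.toNat : Int)) = step := Int.toNat_of_nonneg (by omega)
        have hA := loopA_sub K hK0 step.toNat N count (by rw [hcast]; omega) (by rw [hcast]; omega)
        rw [hcast] at hA
        rw [hA]
        exact ih (N - step) (count + step) (by omega)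
    · rw [solutionLoop, solutionAltLoop, dif_neg hN, dif_neg hN]

-- ===== VERDICT (by name: the statement is the Claim_ definition above) =====
theorem solution_spec : Claim_equal_solution := by
  intro N K _ hpre
  unfold Spec_solution solution solution_alt
  by_cases hK1 : K = 1
  · subst hK1
    have hN : ¬ N > 1 := by have := hpre.2 rfl; omega
    rw [solutionLoop, solutionAltLoop, dif_neg hN, dif_neg hN]
  · exact loop_eq K hpre.1 hK1 N.toNat N 0 (le_refl _)
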